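-- pv_equiv track=rewrite | github.com/Pheonix-ctrl/network-architecture | src/services/ai/medico.py | get_medical_data
-- ===== SOURCE A (Python) =====
-- def get_medical_data(user_message: str) -> str:
--     """Return medical facts only - NO personality, just raw data"""
--     message_lower = user_message.lower()
--
--     # Emergency conditions
--     if any(word in message_lower for word in ['chest pain', 'heart pain', 'can\'t breathe', 'difficulty breathing']):
--         return "EMERGENCY: Chest pain or breathing difficulty requires immediate medical attention. Call emergency services (911) or go to emergency room immediately. Do not wait."
--
--     if any(word in message_lower for word in ['severe bleeding', 'heavy bleeding', 'bleeding heavily']):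
--         return "EMERGENCY: Severe bleeding needs immediate attention. Apply direct pressure to wound with clean cloth. Call emergency services (911) immediately."
--
--     # Stomach/digestive issues
--     if any(word in message_lower for word in ['stomach', 'belly', 'nausea', 'vomiting', 'aching', 'ache']):
--         return "MEDICAL: Stomach pain causes: food, stress, illness. Treatment: Rest, small sips of clear fluids, BRAT diet (bananas, rice, applesauce, toast). Avoid dairy and fatty foods. Take antacids if available. See doctor if severe pain, blood in vomit, or symptoms persist >24 hours."
--
--     # Headaches
--     if any(word in message_lower for word in ['headache', 'head pain', 'migraine']):
--         return "MEDICAL: Headache treatment: Take 650mg acetaminophen (Tylenol) or 400mg ibuprofen (Advil). Rest in dark, quiet room. Stay hydrated. Apply cold compress to forehead. Avoid screens. See doctor if severe, persistent, or with fever/neck stiffness."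
--
--     # Back pain
--     if any(word in message_lower for word in ['back pain', 'backache', 'lower back']):
--         return "MEDICAL: Back pain treatment: Apply ice for first 48 hours, then switch to heat. Take ibuprofen 400mg for inflammation. Gentle movement is better than bed rest. Sleep on firm mattress. See doctor if severe, radiates to legs, or numbness/tingling."
--
--     # Muscle strains
--     if any(word in message_lower for word in ['muscle strain', 'pulled muscle', 'hamstring', 'acl', 'muscle pain']):
--         return "MEDICAL: Muscle strain treatment (RICE): Rest - avoid aggravating activities. Ice - 15-20 minutes every few hours for first 48 hours. Compression - elastic bandage. Elevation - raise above heart level. Take ibuprofen 400mg for pain/inflammation. See doctor if severe or no improvement in 3-4 days."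
--
--     # Fever
--     if any(word in message_lower for word in ['fever', 'high temperature', 'hot', 'burning up']):
--         return "MEDICAL: Fever management: Monitor temperature. Stay hydrated with water and clear fluids. Take acetaminophen 650mg every 6 hours OR ibuprofen 400mg every 6-8 hours. Rest. Light clothing. Cool cloth on forehead. See doctor if fever >102°F (38.9°C) or lasts >3 days."
--
--     # Cuts and wounds
--     if any(word in message_lower for word in ['cut', 'bleeding', 'wound', 'gash']):
--         return "MEDICAL: Cut treatment: Clean hands first. Stop bleeding with direct pressure using clean cloth. Clean wound with water. Apply antibiotic ointment if available. Cover with sterile bandage. Change daily. Watch for infection signs (redness, swelling, pus). See doctor if deep, won't stop bleeding, or shows infection."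
--
--     # Sore throat
--     if any(word in message_lower for word in ['sore throat', 'throat pain', 'throat hurts']):
--         return "MEDICAL: Sore throat treatment: Gargle with warm salt water (1/2 tsp salt in 1 cup water). Stay hydrated with warm liquids. Use throat lozenges. Take acetaminophen or ibuprofen for pain. Use humidifier. Avoid irritants. See doctor if severe, difficulty swallowing, or lasts >1 week."
--
--     # Burns
--     if any(word in message_lower for word in ['burn', 'burned', 'burnt']):
--         return "MEDICAL: Minor burn treatment: Cool with running water for 10-20 minutes. Remove jewelry before swelling. Apply aloe vera or cool, wet cloth. Take ibuprofen for pain. Don't pop blisters. Cover with sterile bandage. See doctor for burns >3 inches, on face/hands, or signs of infection."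
--
--     # Sprains
--     if any(word in message_lower for word in ['sprain', 'twisted', 'ankle', 'wrist']):
--         return "MEDICAL: Sprain treatment (RICE): Rest - avoid using injured area. Ice - 15-20 minutes every few hours for 48 hours. Compression - elastic bandage (not too tight). Elevation - above heart level. Take ibuprofen for swelling. See doctor if unable to bear weight, severe pain, or no improvement in 2-3 days."
--
--     # General fatigue
--     if any(word in message_lower for word in ['tired', 'fatigue', 'exhausted', 'no energy']):
--         return "MEDICAL: Fatigue causes: poor sleep, stress, dehydration, poor diet. Solutions: 7-9 hours sleep nightly, stay hydrated, eat balanced meals, light exercise, manage stress, limit caffeine/alcohol. See doctor if persistent fatigue affects daily activities or lasts >2 weeks."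
--
--     # Skin issues
--     if any(word in message_lower for word in ['rash', 'skin irritation', 'itchy', 'hives']):
--         return "MEDICAL: Skin irritation treatment: Keep clean and dry. Cool, wet compresses. Fragrance-free moisturizer. Antihistamine (Benadryl) for itching. Loose, breathable clothing. Avoid known irritants. See doctor if rash spreads rapidly, has blisters/pus, or with fever."
--
--     # Cough
--     if any(word in message_lower for word in ['cough', 'coughing']):
--         return "MEDICAL: Cough treatment: Stay hydrated with warm liquids. Use humidifier or breathe steam. Honey (1-2 tsp) for cough suppression. Elevate head while sleeping. Avoid irritants. Consider cough drops. See doctor if cough persists >3 weeks, produces blood, or with fever >101°F."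
--
--     # Default response
--     return "MEDICAL: General health advice - Rest and monitor symptoms. Stay hydrated. Take appropriate over-the-counter pain relievers as directed. Apply ice for acute injuries, heat for muscle tension. Seek medical attention if symptoms are severe, persistent, or worsen."
-- ===== SOURCE B (Python) =====
-- RULES = [
--     (('chest pain', 'heart pain', "can't breathe", 'difficulty breathing'), 'EMERGENCY: Chest pain or breathing difficulty requires immediate medical attention. Call emergency services (911) or go to emergency room immediately. Do not wait.'),
--     (('severe bleeding', 'heavy bleeding', 'bleeding heavily'), 'EMERGENCY: Severe bleeding needs immediate attention. Apply direct pressure to wound with clean cloth. Call emergency services (911) immediately.'),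
--     (('stomach', 'belly', 'nausea', 'vomiting', 'aching', 'ache'), 'MEDICAL: Stomach pain causes: food, stress, illness. Treatment: Rest, small sips of clear fluids, BRAT diet (bananas, rice, applesauce, toast). Avoid dairy and fatty foods. Take antacids if available. See doctor if severe pain, blood in vomit, or symptoms persist >24 hours.'),
--     (('headache', 'head pain', 'migraine'), 'MEDICAL: Headache treatment: Take 650mg acetaminophen (Tylenol) or 400mg ibuprofen (Advil). Rest in dark, quiet room. Stay hydrated. Apply cold compress to forehead. Avoid screens. See doctor if severe, persistent, or with fever/neck stiffness.'),
--     (('back pain', 'backache', 'lower back'), 'MEDICAL: Back pain treatment: Apply ice for first 48 hours, then switch to heat. Take ibuprofen 400mg for inflammation. Gentle movement is better than bed rest. Sleep on firm mattress. See doctor if severe, radiates to legs, or numbness/tingling.'),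
--     (('muscle strain', 'pulled muscle', 'hamstring', 'acl', 'muscle pain'), 'MEDICAL: Muscle strain treatment (RICE): Rest - avoid aggravating activities. Ice - 15-20 minutes every few hours for first 48 hours. Compression - elastic bandage. Elevation - raise above heart level. Take ibuprofen 400mg for pain/inflammation. See doctor if severe or no improvement in 3-4 days.'),
--     (('fever', 'high temperature', 'hot', 'burning up'), 'MEDICAL: Fever management: Monitor temperature. Stay hydrated with water and clear fluids. Take acetaminophen 650mg every 6 hours OR ibuprofen 400mg every 6-8 hours. Rest. Light clothing. Cool cloth on forehead. See doctor if fever >102\u00b0F (38.9\u00b0C) or lasts >3 days.'),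
--     (('cut', 'bleeding', 'wound', 'gash'), "MEDICAL: Cut treatment: Clean hands first. Stop bleeding with direct pressure using clean cloth. Clean wound with water. Apply antibiotic ointment if available. Cover with sterile bandage. Change daily. Watch for infection signs (redness, swelling, pus). See doctor if deep, won't stop bleeding, or shows infection."),
--     (('sore throat', 'throat pain', 'throat hurts'), 'MEDICAL: Sore throat treatment: Gargle with warm salt water (1/2 tsp salt in 1 cup water). Stay hydrated with warm liquids. Use throat lozenges. Take acetaminophen or ibuprofen for pain. Use humidifier. Avoid irritants. See doctor if severe, difficulty swallowing, or lasts >1 week.'),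
--     (('burn', 'burned', 'burnt'), "MEDICAL: Minor burn treatment: Cool with running water for 10-20 minutes. Remove jewelry before swelling. Apply aloe vera or cool, wet cloth. Take ibuprofen for pain. Don't pop blisters. Cover with sterile bandage. See doctor for burns >3 inches, on face/hands, or signs of infection."),
--     (('sprain', 'twisted', 'ankle', 'wrist'), 'MEDICAL: Sprain treatment (RICE): Rest - avoid using injured area. Ice - 15-20 minutes every few hours for 48 hours. Compression - elastic bandage (not too tight). Elevation - above heart level. Take ibuprofen for swelling. See doctor if unable to bear weight, severe pain, or no improvement in 2-3 days.'),
--     (('tired', 'fatigue', 'exhausted', 'no energy'), 'MEDICAL: Fatigue causes: poor sleep, stress, dehydration, poor diet. Solutions: 7-9 hours sleep nightly, stay hydrated, eat balanced meals, light exercise, manage stress, limit caffeine/alcohol. See doctor if persistent fatigue affects daily activities or lasts >2 weeks.'),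
--     (('rash', 'skin irritation', 'itchy', 'hives'), 'MEDICAL: Skin irritation treatment: Keep clean and dry. Cool, wet compresses. Fragrance-free moisturizer. Antihistamine (Benadryl) for itching. Loose, breathable clothing. Avoid known irritants. See doctor if rash spreads rapidly, has blisters/pus, or with fever.'),
--     (('cough', 'coughing'), 'MEDICAL: Cough treatment: Stay hydrated with warm liquids. Use humidifier or breathe steam. Honey (1-2 tsp) for cough suppression. Elevate head while sleeping. Avoid irritants. Consider cough drops. See doctor if cough persists >3 weeks, produces blood, or with fever >101\u00b0F.'),
-- ]
--
-- DEFAULT = 'MEDICAL: General health advice - Rest and monitor symptoms. Stay hydrated. Take appropriate over-the-counter pain relievers as directed. Apply ice for acute injuries, heat for muscle tension. Seek medical attention if symptoms are severe, persistent, or worsen.'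
--
-- # Flat priority index: every keyword paired with the index of its rule.
-- KEYWORDS = [(w, i) for i, (ws, _) in enumerate(RULES) for w in ws]
-- RESPONSES = [r for _, r in RULES]
--
-- def get_medical_data(user_message: str) -> str:
--     low = user_message.lower()
--     # collect the rule indices of ALL matching keywords, answer with the highest-priority (minimum) one
--     hits = [i for w, i in KEYWORDS if w in low]
--     return RESPONSES[min(hits)] if hits else DEFAULT
-- ===== Notes on version B (the rewrite author's own statement) =====
-- stated objective: alternative
-- what changed: Replaces A's ordered if-cascade with early return by a priority-index algorithm: a flat keyword-to-rule-index list is scanned once collecting ALL matching rule indices, and the response at the minimum (highest-priority) index is returned, default if no hits.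
import Mathlib
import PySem

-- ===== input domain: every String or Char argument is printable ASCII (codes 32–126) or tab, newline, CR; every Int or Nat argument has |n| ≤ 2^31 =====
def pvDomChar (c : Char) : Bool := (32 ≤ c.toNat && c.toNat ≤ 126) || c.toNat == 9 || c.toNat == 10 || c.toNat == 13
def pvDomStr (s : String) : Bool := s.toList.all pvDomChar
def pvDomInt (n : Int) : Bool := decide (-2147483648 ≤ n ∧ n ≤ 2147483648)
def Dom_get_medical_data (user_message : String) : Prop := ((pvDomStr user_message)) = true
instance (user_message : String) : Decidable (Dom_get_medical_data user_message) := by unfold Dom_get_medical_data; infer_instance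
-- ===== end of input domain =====

-- B replaces A's ordered if-cascade (early return) by a priority-index algorithm: collect the rule
-- indices of ALL matching keywords from a flat keyword table, return the response at the minimum index.
-- Objective: alternative (same cost, genuinely different computation).
-- ===== PORT A =====
def get_medical_data (user_message : String) : String :=
  let message_lower := PySem.Str.lower user_message
  if (["chest pain", "heart pain", "can't breathe", "difficulty breathing"] : List String).any (fun word => PySem.Str.isIn word message_lower) then
    "EMERGENCY: Chest pain or breathing difficulty requires immediate medical attention. Call emergency services (911) or go to emergency room immediately. Do not wait."
  else
  if (["severe bleeding", "heavy bleeding", "bleeding heavily"] : List String).any (fun word => PySem.Str.isIn word message_lower) then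
    "EMERGENCY: Severe bleeding needs immediate attention. Apply direct pressure to wound with clean cloth. Call emergency services (911) immediately."
  else
  if (["stomach", "belly", "nausea", "vomiting", "aching", "ache"] : List String).any (fun word => PySem.Str.isIn word message_lower) then
    "MEDICAL: Stomach pain causes: food, stress, illness. Treatment: Rest, small sips of clear fluids, BRAT diet (bananas, rice, applesauce, toast). Avoid dairy and fatty foods. Take antacids if available. See doctor if severe pain, blood in vomit, or symptoms persist >24 hours."
  else
  if (["headache", "head pain", "migraine"] : List String).any (fun word => PySem.Str.isIn word message_lower) then
    "MEDICAL: Headache treatment: Take 650mg acetaminophen (Tylenol) or 400mg ibuprofen (Advil). Rest in dark, quiet room. Stay hydrated. Apply cold compress to forehead. Avoid screens. See doctor if severe, persistent, or with fever/neck stiffness."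
  else
  if (["back pain", "backache", "lower back"] : List String).any (fun word => PySem.Str.isIn word message_lower) then
    "MEDICAL: Back pain treatment: Apply ice for first 48 hours, then switch to heat. Take ibuprofen 400mg for inflammation. Gentle movement is better than bed rest. Sleep on firm mattress. See doctor if severe, radiates to legs, or numbness/tingling."
  else
  if (["muscle strain", "pulled muscle", "hamstring", "acl", "muscle pain"] : List String).any (fun word => PySem.Str.isIn word message_lower) then
    "MEDICAL: Muscle strain treatment (RICE): Rest - avoid aggravating activities. Ice - 15-20 minutes every few hours for first 48 hours. Compression - elastic bandage. Elevation - raise above heart level. Take ibuprofen 400mg for pain/inflammation. See doctor if severe or no improvement in 3-4 days."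
  else
  if (["fever", "high temperature", "hot", "burning up"] : List String).any (fun word => PySem.Str.isIn word message_lower) then
    "MEDICAL: Fever management: Monitor temperature. Stay hydrated with water and clear fluids. Take acetaminophen 650mg every 6 hours OR ibuprofen 400mg every 6-8 hours. Rest. Light clothing. Cool cloth on forehead. See doctor if fever >102°F (38.9°C) or lasts >3 days."
  else
  if (["cut", "bleeding", "wound", "gash"] : List String).any (fun word => PySem.Str.isIn word message_lower) then
    "MEDICAL: Cut treatment: Clean hands first. Stop bleeding with direct pressure using clean cloth. Clean wound with water. Apply antibiotic ointment if available. Cover with sterile bandage. Change daily. Watch for infection signs (redness, swelling, pus). See doctor if deep, won't stop bleeding, or shows infection."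
  else
  if (["sore throat", "throat pain", "throat hurts"] : List String).any (fun word => PySem.Str.isIn word message_lower) then
    "MEDICAL: Sore throat treatment: Gargle with warm salt water (1/2 tsp salt in 1 cup water). Stay hydrated with warm liquids. Use throat lozenges. Take acetaminophen or ibuprofen for pain. Use humidifier. Avoid irritants. See doctor if severe, difficulty swallowing, or lasts >1 week."
  else
  if (["burn", "burned", "burnt"] : List String).any (fun word => PySem.Str.isIn word message_lower) then
    "MEDICAL: Minor burn treatment: Cool with running water for 10-20 minutes. Remove jewelry before swelling. Apply aloe vera or cool, wet cloth. Take ibuprofen for pain. Don't pop blisters. Cover with sterile bandage. See doctor for burns >3 inches, on face/hands, or signs of infection."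
  else
  if (["sprain", "twisted", "ankle", "wrist"] : List String).any (fun word => PySem.Str.isIn word message_lower) then
    "MEDICAL: Sprain treatment (RICE): Rest - avoid using injured area. Ice - 15-20 minutes every few hours for 48 hours. Compression - elastic bandage (not too tight). Elevation - above heart level. Take ibuprofen for swelling. See doctor if unable to bear weight, severe pain, or no improvement in 2-3 days."
  else
  if (["tired", "fatigue", "exhausted", "no energy"] : List String).any (fun word => PySem.Str.isIn word message_lower) then
    "MEDICAL: Fatigue causes: poor sleep, stress, dehydration, poor diet. Solutions: 7-9 hours sleep nightly, stay hydrated, eat balanced meals, light exercise, manage stress, limit caffeine/alcohol. See doctor if persistent fatigue affects daily activities or lasts >2 weeks."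
  else
  if (["rash", "skin irritation", "itchy", "hives"] : List String).any (fun word => PySem.Str.isIn word message_lower) then
    "MEDICAL: Skin irritation treatment: Keep clean and dry. Cool, wet compresses. Fragrance-free moisturizer. Antihistamine (Benadryl) for itching. Loose, breathable clothing. Avoid known irritants. See doctor if rash spreads rapidly, has blisters/pus, or with fever."
  else
  if (["cough", "coughing"] : List String).any (fun word => PySem.Str.isIn word message_lower) then
    "MEDICAL: Cough treatment: Stay hydrated with warm liquids. Use humidifier or breathe steam. Honey (1-2 tsp) for cough suppression. Elevate head while sleeping. Avoid irritants. Consider cough drops. See doctor if cough persists >3 weeks, produces blood, or with fever >101°F."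
  else
    "MEDICAL: General health advice - Rest and monitor symptoms. Stay hydrated. Take appropriate over-the-counter pain relievers as directed. Apply ice for acute injuries, heat for muscle tension. Seek medical attention if symptoms are severe, persistent, or worsen."

-- ===== PORT B =====
def pvRules : List (List String × String) := [
  (["chest pain", "heart pain", "can't breathe", "difficulty breathing"], "EMERGENCY: Chest pain or breathing difficulty requires immediate medical attention. Call emergency services (911) or go to emergency room immediately. Do not wait."),
  (["severe bleeding", "heavy bleeding", "bleeding heavily"], "EMERGENCY: Severe bleeding needs immediate attention. Apply direct pressure to wound with clean cloth. Call emergency services (911) immediately."),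
  (["stomach", "belly", "nausea", "vomiting", "aching", "ache"], "MEDICAL: Stomach pain causes: food, stress, illness. Treatment: Rest, small sips of clear fluids, BRAT diet (bananas, rice, applesauce, toast). Avoid dairy and fatty foods. Take antacids if available. See doctor if severe pain, blood in vomit, or symptoms persist >24 hours."),
  (["headache", "head pain", "migraine"], "MEDICAL: Headache treatment: Take 650mg acetaminophen (Tylenol) or 400mg ibuprofen (Advil). Rest in dark, quiet room. Stay hydrated. Apply cold compress to forehead. Avoid screens. See doctor if severe, persistent, or with fever/neck stiffness."),
  (["back pain", "backache", "lower back"], "MEDICAL: Back pain treatment: Apply ice for first 48 hours, then switch to heat. Take ibuprofen 400mg for inflammation. Gentle movement is better than bed rest. Sleep on firm mattress. See doctor if severe, radiates to legs, or numbness/tingling."),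
  (["muscle strain", "pulled muscle", "hamstring", "acl", "muscle pain"], "MEDICAL: Muscle strain treatment (RICE): Rest - avoid aggravating activities. Ice - 15-20 minutes every few hours for first 48 hours. Compression - elastic bandage. Elevation - raise above heart level. Take ibuprofen 400mg for pain/inflammation. See doctor if severe or no improvement in 3-4 days."),
  (["fever", "high temperature", "hot", "burning up"], "MEDICAL: Fever management: Monitor temperature. Stay hydrated with water and clear fluids. Take acetaminophen 650mg every 6 hours OR ibuprofen 400mg every 6-8 hours. Rest. Light clothing. Cool cloth on forehead. See doctor if fever >102°F (38.9°C) or lasts >3 days."),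
  (["cut", "bleeding", "wound", "gash"], "MEDICAL: Cut treatment: Clean hands first. Stop bleeding with direct pressure using clean cloth. Clean wound with water. Apply antibiotic ointment if available. Cover with sterile bandage. Change daily. Watch for infection signs (redness, swelling, pus). See doctor if deep, won't stop bleeding, or shows infection."),
  (["sore throat", "throat pain", "throat hurts"], "MEDICAL: Sore throat treatment: Gargle with warm salt water (1/2 tsp salt in 1 cup water). Stay hydrated with warm liquids. Use throat lozenges. Take acetaminophen or ibuprofen for pain. Use humidifier. Avoid irritants. See doctor if severe, difficulty swallowing, or lasts >1 week."),
  (["burn", "burned", "burnt"], "MEDICAL: Minor burn treatment: Cool with running water for 10-20 minutes. Remove jewelry before swelling. Apply aloe vera or cool, wet cloth. Take ibuprofen for pain. Don't pop blisters. Cover with sterile bandage. See doctor for burns >3 inches, on face/hands, or signs of infection."),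
  (["sprain", "twisted", "ankle", "wrist"], "MEDICAL: Sprain treatment (RICE): Rest - avoid using injured area. Ice - 15-20 minutes every few hours for 48 hours. Compression - elastic bandage (not too tight). Elevation - above heart level. Take ibuprofen for swelling. See doctor if unable to bear weight, severe pain, or no improvement in 2-3 days."),
  (["tired", "fatigue", "exhausted", "no energy"], "MEDICAL: Fatigue causes: poor sleep, stress, dehydration, poor diet. Solutions: 7-9 hours sleep nightly, stay hydrated, eat balanced meals, light exercise, manage stress, limit caffeine/alcohol. See doctor if persistent fatigue affects daily activities or lasts >2 weeks."),
  (["rash", "skin irritation", "itchy", "hives"], "MEDICAL: Skin irritation treatment: Keep clean and dry. Cool, wet compresses. Fragrance-free moisturizer. Antihistamine (Benadryl) for itching. Loose, breathable clothing. Avoid known irritants. See doctor if rash spreads rapidly, has blisters/pus, or with fever."),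
  (["cough", "coughing"], "MEDICAL: Cough treatment: Stay hydrated with warm liquids. Use humidifier or breathe steam. Honey (1-2 tsp) for cough suppression. Elevate head while sleeping. Avoid irritants. Consider cough drops. See doctor if cough persists >3 weeks, produces blood, or with fever >101°F.")
]

def pvDefault : String := "MEDICAL: General health advice - Rest and monitor symptoms. Stay hydrated. Take appropriate over-the-counter pain relievers as directed. Apply ice for acute injuries, heat for muscle tension. Seek medical attention if symptoms are severe, persistent, or worsen."

-- KEYWORDS = [(w, i) for i, (ws, _) in enumerate(RULES) for w in ws]
def pvKeywords : List (String × Int) :=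
  (PySem.List.enumerate pvRules 0).flatMap (fun p => p.2.1.map (fun w => (w, p.1)))

-- RESPONSES = [r for _, r in RULES]
def pvResponses : List String := pvRules.map Prod.snd

def get_medical_data_alt (user_message : String) : String :=
  let low := PySem.Str.lower user_message
  let hits := pvKeywords.filterMap (fun p => if PySem.Str.isIn p.1 low then some p.2 else none)
  match hits with
  | [] => pvDefault
  | h :: t =>
      -- RESPONSES[min(hits)]; min(hits) is always a valid index, so the none branch is unreachable
      match PySem.List.min? (h :: t) (fun x => x) with
      | some m => (PySem.List.pyGet? pvResponses m).getD pvDefault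
      | none => pvDefault

-- ===== PRECONDITION & SPEC =====
def Spec_get_medical_data (user_message : String) (out : String) : Prop := out = get_medical_data_alt user_message
instance (user_message : String) (out : String) : Decidable (Spec_get_medical_data user_message out) := by unfold Spec_get_medical_data; infer_instance

-- ===== CLAIM (what is proved, stated in full; the proofs are below) =====
def Claim_equal_get_medical_data : Prop := ∀ (user_message : String), Dom_get_medical_data user_message → Spec_get_medical_data user_message (get_medical_data user_message)

-- ===== LEMMAS AND PROOFS =====

-- A's cascade, characterised as ordered first-match over rule groups (proof-side only).
def pvFirstMatch (low : String) : List (List String × String) → String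
  | [] => pvDefault
  | (keywords, response) :: rest =>
      if keywords.any (fun word => PySem.Str.isIn word low) then response
      else pvFirstMatch low rest

-- B's hits list computed over the rules enumerated from offset i (proof-side generalisation).
def pvHits (low : String) (i : Int) (rules : List (List String × String)) : List Int :=
  ((PySem.List.enumerate rules i).flatMap (fun p => p.2.1.map (fun w => (w, p.1)))).filterMap
    (fun p => if PySem.Str.isIn p.1 low then some p.2 else none)

-- B's answer from such a hits list (proof-side generalisation): response at the minimum hit, offset i.
def pvAnswer (low : String) (i : Int) (rules : List (List String × String)) : String :=
  match PySem.List.min? (pvHits low i rules) (fun x => x) with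
  | some m => (PySem.List.pyGet? (rules.map Prod.snd) (m - i)).getD pvDefault
  | none => pvDefault

theorem pvFilterMap_const (c : String → Bool) (i : Int) : ∀ ws : List String,
    ws.filterMap (fun w => if c w then some i else none) = List.replicate (ws.countP c) i
  | [] => rfl
  | w :: ws => by
      by_cases h : c w
      · simp [h, pvFilterMap_const c i ws, List.replicate_succ]
      · simp [h, pvFilterMap_const c i ws]

theorem pvHits_cons (low : String) (i : Int) (ws : List String) (r : String)
    (rest : List (List String × String)) :
    pvHits low i ((ws, r) :: rest) =
      List.replicate (ws.countP (fun w => PySem.Str.isIn w low)) i ++ pvHits low (i + 1) rest := by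
  unfold pvHits
  rw [PySem.List.enumerate_cons, List.flatMap_cons, List.filterMap_append, List.filterMap_map]
  congr 1
  exact pvFilterMap_const (fun w => PySem.Str.isIn w low) i ws

theorem pvHits_lb (low : String) : ∀ (rules : List (List String × String)) (i : Int),
    ∀ x ∈ pvHits low i rules, i ≤ x := by
  intro rules
  induction rules with
  | nil => intro i x hx; simp [pvHits] at hx
  | cons hd rest ih =>
      intro i x hx
      obtain ⟨ws, r⟩ := hd
      rw [pvHits_cons] at hx
      rcases List.mem_append.1 hx with h | h
      · rw [List.eq_of_mem_replicate h]
      · have := ih (i + 1) x h; omega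

theorem pvFoldlMin_eq (k : Int) : ∀ (t : List Int) (h : Int),
    (∀ x ∈ h :: t, k ≤ x) → k ∈ h :: t → t.foldl min h = k := by
  intro t
  induction t with
  | nil =>
      intro h hb hm
      simp only [List.mem_singleton] at hm
      simp only [List.foldl_nil]
      omega
  | cons x t' ih =>
      intro h hb hm
      have h1 := hb h (by simp)
      have h2 := hb x (by simp)
      simp only [List.foldl_cons]
      apply ih
      · intro y hy
        rcases List.mem_cons.1 hy with hy | hy
        · subst hy; exact le_min h1 h2
        · exact hb y (by simp [hy])
      · rcases List.mem_cons.1 hm with hm | hm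
        · exact List.mem_cons.2 (Or.inl (by omega))
        · rcases List.mem_cons.1 hm with hm | hm
          · exact List.mem_cons.2 (Or.inl (by omega))
          · exact List.mem_cons.2 (Or.inr hm)

theorem pvPyGet?_cons_of_pos {α : Type} (x : α) (xs : List α) (j : Int) (hj : 1 ≤ j) :
    PySem.List.pyGet? (x :: xs) j = PySem.List.pyGet? xs (j - 1) := by
  rw [PySem.List.pyGet?_of_nonneg _ (by omega : (0:Int) ≤ j),
    PySem.List.pyGet?_of_nonneg _ (by omega : (0:Int) ≤ j - 1)]
  have hn : j.toNat = (j - 1).toNat + 1 := by omega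
  rw [hn, List.getElem?_cons_succ]

theorem pvAnswer_eq_firstMatch (low : String) :
    ∀ (rules : List (List String × String)) (i : Int),
      pvAnswer low i rules = pvFirstMatch low rules := by
  intro rules
  induction rules with
  | nil => intro i; rfl
  | cons hd rest ih =>
      intro i
      obtain ⟨ws, r⟩ := hd
      by_cases hg : ws.any (fun w => PySem.Str.isIn w low) = true
      · -- this rule matches: the minimum hit is i, the answer is r
        have hc : 0 < ws.countP (fun w => PySem.Str.isIn w low) :=
          List.countP_pos_iff.2 (by simpa [List.any_eq_true] using hg)
        have hrep : List.replicate (ws.countP (fun w => PySem.Str.isIn w low)) i =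
            i :: List.replicate (ws.countP (fun w => PySem.Str.isIn w low) - 1) i := by
          cases hcp : ws.countP (fun w => PySem.Str.isIn w low) with
          | zero => rw [hcp] at hc; exact absurd hc (lt_irrefl 0)
          | succ n => simp [List.replicate_succ]
        unfold pvAnswer
        rw [pvHits_cons, hrep, List.cons_append, PySem.List.min?_id_cons]
        have hall : ∀ x ∈ i :: (List.replicate (ws.countP (fun w => PySem.Str.isIn w low) - 1) i
            ++ pvHits low (i + 1) rest), i ≤ x := by
          intro x hx
          rcases List.mem_cons.1 hx with hx | hx
          · omega
          · rcases List.mem_append.1 hx with hx | hx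
            · rw [List.eq_of_mem_replicate hx]
            · have := pvHits_lb low rest (i + 1) x hx; omega
        have hfold := pvFoldlMin_eq i
          (List.replicate (ws.countP (fun w => PySem.Str.isIn w low) - 1) i
            ++ pvHits low (i + 1) rest) i hall (by simp)
        rw [hfold]
        have hFM : pvFirstMatch low ((ws, r) :: rest) = r := by
          show (if ws.any (fun word => PySem.Str.isIn word low) then r
                else pvFirstMatch low rest) = r
          rw [if_pos hg]
        rw [hFM]
        show (PySem.List.pyGet? (List.map Prod.snd ((ws, r) :: rest)) (i - i)).getD pvDefault = r
        rw [sub_self, List.map_cons, PySem.List.pyGet?_zero_cons]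
        rfl
      · -- this rule does not match: defer to the rest, shifting the response index by one
        have hc : ws.countP (fun w => PySem.Str.isIn w low) = 0 := by
          rw [List.countP_eq_zero]
          intro w hw hcon
          exact hg (List.any_eq_true.2 ⟨w, hw, hcon⟩)
        unfold pvAnswer
        rw [pvHits_cons, hc, List.replicate_zero, List.nil_append]
        have hFM : pvFirstMatch low ((ws, r) :: rest) = pvFirstMatch low rest := by
          show (if ws.any (fun word => PySem.Str.isIn word low) then r
                else pvFirstMatch low rest) = pvFirstMatch low rest
          rw [if_neg hg]
        rw [hFM, ← ih (i + 1)]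
        unfold pvAnswer
        cases hmo : PySem.List.min? (pvHits low (i + 1) rest) (fun x => x) with
        | none => rfl
        | some m =>
            have hge : i + 1 ≤ m := pvHits_lb low rest (i + 1) m (PySem.List.min?_mem hmo)
            simp only [List.map_cons]
            rw [pvPyGet?_cons_of_pos _ _ _ (by omega)]
            congr 2
            omega

-- ===== VERDICT (by name: the statement is the Claim_ definition above) =====
theorem get_medical_data_spec : Claim_equal_get_medical_data := by
  intro m _
  unfold Spec_get_medical_data
  have hB : get_medical_data_alt m = pvAnswer (PySem.Str.lower m) 0 pvRules := by
    show (match pvHits (PySem.Str.lower m) 0 pvRules with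
          | [] => pvDefault
          | h :: t =>
              match PySem.List.min? (h :: t) (fun x => x) with
              | some mm => (PySem.List.pyGet? pvResponses mm).getD pvDefault
              | none => pvDefault) = _
    unfold pvAnswer
    cases hh : pvHits (PySem.Str.lower m) 0 pvRules with
    | nil => rw [(PySem.List.min?_eq_none_iff _ _).2 rfl]
    | cons h t =>
        show (match PySem.List.min? (h :: t) (fun x => x) with
              | some mm => (PySem.List.pyGet? pvResponses mm).getD pvDefault
              | none => pvDefault) = _
        cases PySem.List.min? (h :: t) (fun x => x) with
        | none => rfl
        | some mm => simp [pvResponses]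
  rw [hB, pvAnswer_eq_firstMatch]
  unfold get_medical_data
  simp only [pvFirstMatch, pvRules, pvDefault]
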